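-- pv_equiv track=rewrite | github.com/jonathonfletcher/adventofcode | 2024/14/a.py | isshape
-- ===== SOURCE A (Python) =====
-- import itertools
--
-- def isshape(space, points, shape, /):
--     sx, sy = space
--     maxsx = 1 + max(map(lambda xy: xy[0], shape))
--     maxsy = 1 + max(map(lambda xy: xy[-1], shape))
--
--     for xo, yo in itertools.product(range(sx - maxsx), range(sy - maxsy)):
--         sn = 0
--         for ssx, ssy in shape:
--             if (ssx + xo, ssy + yo) in points:
--                 sn += 1
--             else:
--                 break
--         if sn == len(shape):
--             return True
--     return False
-- ===== SOURCE B (Python) =====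
-- def isshape(space, points, shape, /):
--     sx, sy = space
--     bx = sx - 1 - max(p[0] for p in shape)
--     by = sy - 1 - max(p[1] for p in shape)
--     x0, y0 = shape[0]
--     pts = set(points)
--     return any(
--         0 <= px - x0 < bx and 0 <= py - y0 < by
--         and all((qx + px - x0, qy + py - y0) in pts for qx, qy in shape)
--         for px, py in pts)
-- ===== Notes on version B (the rewrite author's own statement) =====
-- stated objective: faster
-- what changed: Instead of scanning every offset of the whole space grid, B derives the only candidate offsets from the points themselves (p - shape[0]), filters them to the allowed range, and verifies shape membership against a hash set of points.
import Mathlib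
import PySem

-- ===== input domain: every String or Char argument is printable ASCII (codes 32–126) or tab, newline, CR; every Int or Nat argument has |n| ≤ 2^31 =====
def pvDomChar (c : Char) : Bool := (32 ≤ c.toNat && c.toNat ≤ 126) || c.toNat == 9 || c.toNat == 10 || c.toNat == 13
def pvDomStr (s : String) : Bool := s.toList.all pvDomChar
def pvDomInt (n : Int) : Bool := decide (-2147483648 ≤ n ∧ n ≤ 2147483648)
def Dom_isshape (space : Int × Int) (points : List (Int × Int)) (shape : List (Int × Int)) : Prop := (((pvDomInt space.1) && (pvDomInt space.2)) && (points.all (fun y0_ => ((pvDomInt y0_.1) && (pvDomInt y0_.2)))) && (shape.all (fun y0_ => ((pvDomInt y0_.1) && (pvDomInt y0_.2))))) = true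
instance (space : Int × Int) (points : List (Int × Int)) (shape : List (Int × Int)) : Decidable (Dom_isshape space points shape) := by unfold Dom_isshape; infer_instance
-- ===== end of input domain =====

-- B replaces A's scan over every grid offset by checking only offsets derived from the points
-- themselves (p - shape[0]) against a set of points (objective: faster, asymptotic).

-- ===== PORT A =====
-- inner 'for ssx, ssy in shape' loop with its counter sn and the break
def innerScanA (points : List (Int × Int)) (xo yo : Int) : List (Int × Int) → Int → Int
  | [], sn => sn
  | s :: rest, sn =>
      if points.contains (s.1 + xo, s.2 + yo) then innerScanA points xo yo rest (sn + 1)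
      else sn

def isshape (space : Int × Int) (points : List (Int × Int)) (shape : List (Int × Int)) : Bool :=
  -- max(map(lambda xy: xy[0], shape)): Python raises ValueError on empty shape (Pre_ excludes it)
  -- xy[-1] on a length-2 tuple is its second component
  match PySem.List.max? (shape.map Prod.fst) (fun y => y),
        PySem.List.max? (shape.map Prod.snd) (fun y => y) with
  | some m1, some m2 =>
      let maxsx := 1 + m1
      let maxsy := 1 + m2
      (PySem.List.pyRange 0 (space.1 - maxsx) 1).any (fun xo =>
        (PySem.List.pyRange 0 (space.2 - maxsy) 1).any (fun yo =>
          innerScanA points xo yo shape 0 == (shape.length : Int)))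
  | _, _ => false

-- ===== PORT B =====
def isshape_alt (space : Int × Int) (points : List (Int × Int)) (shape : List (Int × Int)) : Bool :=
  match shape with
  | [] => false  -- Python B raises ValueError here (max of empty); outside Pre_
  | (x0, y0) :: _ =>
      match PySem.List.max? (shape.map Prod.fst) (fun y => y) with
      | none => false
      | some m1 =>
        match PySem.List.max? (shape.map Prod.snd) (fun y => y) with
        | none => false
        | some m2 =>
          let bx := space.1 - 1 - m1
          let by_ := space.2 - 1 - m2
          let pts := PySem.Set.ofList points
          -- any over a set: the result is order-independent
          pts.any (fun p =>
            decide (0 ≤ p.1 - x0 ∧ p.1 - x0 < bx) &&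
            decide (0 ≤ p.2 - y0 ∧ p.2 - y0 < by_) &&
            shape.all (fun q => pts.contains (q.1 + p.1 - x0, q.2 + p.2 - y0)))

-- ===== PRECONDITION & SPEC =====
-- Pre_ excludes the empty shape, on which Python A (and B) raise ValueError from max().
def Pre_isshape (space : Int × Int) (points : List (Int × Int)) (shape : List (Int × Int)) : Prop := shape ≠ []
instance (space : Int × Int) (points : List (Int × Int)) (shape : List (Int × Int)) : Decidable (Pre_isshape space points shape) := by unfold Pre_isshape; infer_instance

def pvWitness_isshape : (Int × Int) × (List (Int × Int)) × (List (Int × Int)) :=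
  ((4, 4), [(1, 1), (1, 2)], [(0, 0), (0, 1)])

def Spec_isshape (space : Int × Int) (points : List (Int × Int)) (shape : List (Int × Int)) (out : Bool) : Prop := out = isshape_alt space points shape
instance (space : Int × Int) (points : List (Int × Int)) (shape : List (Int × Int)) (out : Bool) : Decidable (Spec_isshape space points shape out) := by unfold Spec_isshape; infer_instance

-- ===== CLAIM (what is proved, stated in full; the proofs are below) =====
def Claim_equal_isshape : Prop := ∀ (space : Int × Int) (points : List (Int × Int)) (shape : List (Int × Int)), Dom_isshape space points shape → Pre_isshape space points shape → Spec_isshape space points shape (isshape space points shape)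

-- ===== LEMMAS AND PROOFS =====

-- the inner counting loop reaches len(shape) iff every shifted shape cell is a point
theorem innerScanA_eq_length (points : List (Int × Int)) (xo yo : Int)
    (l : List (Int × Int)) (sn : Int) :
    (innerScanA points xo yo l sn == sn + (l.length : Int)) =
      l.all (fun s => points.contains (s.1 + xo, s.2 + yo)) := by
  induction l generalizing sn with
  | nil => simp [innerScanA]
  | cons s rest ih =>
      simp only [innerScanA, List.all_cons]
      by_cases hc : points.contains (s.1 + xo, s.2 + yo)
      · have := ih (sn + 1)
        simp only [hc, if_pos, Bool.true_and]
        rw [show sn + ((s :: rest).length : Int) = (sn + 1) + (rest.length : Int) by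
          simp; ring]
        exact this
      · simp only [hc, Bool.false_and]
        have : ¬ (sn = sn + ((s :: rest).length : Int)) := by
          simp; omega
        simpa [beq_iff_eq] using this

theorem isshape_spec' (space : Int × Int) (points : List (Int × Int))
    (shape : List (Int × Int)) (hne : shape ≠ []) :
    isshape space points shape = isshape_alt space points shape := by
  obtain ⟨⟨x0, y0⟩, tl, rfl⟩ : ∃ h t, shape = h :: t := by
    cases shape with
    | nil => exact absurd rfl hne
    | cons h t => exact ⟨h, t, rfl⟩
  unfold isshape isshape_alt
  obtain ⟨m1, hm1⟩ : ∃ m, PySem.List.max? (((x0, y0) :: tl).map Prod.fst) (fun y => y) = some m := by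
    cases h : PySem.List.max? (((x0, y0) :: tl).map Prod.fst) (fun y => y) with
    | none => simp [PySem.List.max?_eq_none_iff] at h
    | some m => exact ⟨m, rfl⟩
  obtain ⟨m2, hm2⟩ : ∃ m, PySem.List.max? (((x0, y0) :: tl).map Prod.snd) (fun y => y) = some m := by
    cases h : PySem.List.max? (((x0, y0) :: tl).map Prod.snd) (fun y => y) with
    | none => simp [PySem.List.max?_eq_none_iff] at h
    | some m => exact ⟨m, rfl⟩
  rw [hm1, hm2]
  rw [Bool.eq_iff_iff]
  simp only [List.any_eq_true, PySem.List.mem_pyRange_one]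
  have hinner : ∀ xo yo : Int,
      (innerScanA points xo yo ((x0, y0) :: tl) 0 == ((((x0, y0) :: tl).length : Nat) : Int)) =
        ((x0, y0) :: tl).all (fun s => points.contains (s.1 + xo, s.2 + yo)) := fun xo yo => by
    simpa using innerScanA_eq_length points xo yo ((x0, y0) :: tl) 0
  have ptsc : ∀ z : Int × Int, ((PySem.Set.ofList points).contains z = true) ↔ z ∈ points := fun z => by
    simp [PySem.Set.mem_ofList]
  constructor
  · rintro ⟨xo, ⟨hx0, hxb⟩, yo, ⟨hy0, hyb⟩, hall⟩
    rw [hinner] at hall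
    rw [List.all_eq_true] at hall
    have hhead : (x0 + xo, y0 + yo) ∈ points := by
      have := hall (x0, y0) (by simp)
      simpa using this
    refine ⟨(x0 + xo, y0 + yo), by simpa [PySem.Set.mem_ofList] using hhead, ?_⟩
    simp only [Bool.and_eq_true, decide_eq_true_eq, List.all_eq_true]
    refine ⟨⟨⟨by omega, by omega⟩, by omega, by omega⟩, ?_⟩
    intro q hq
    have hq' := hall q hq
    have heq : (q.1 + (x0 + xo) - x0, q.2 + (y0 + yo) - y0) = (q.1 + xo, q.2 + yo) := by
      ext <;> simp <;> ring
    rw [ptsc, heq]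
    simpa using hq'
  · rintro ⟨p, hp, hcond⟩
    simp only [Bool.and_eq_true, decide_eq_true_eq, List.all_eq_true] at hcond
    obtain ⟨⟨⟨hx0, hxb⟩, hy0, hyb⟩, hall⟩ := hcond
    refine ⟨p.1 - x0, ⟨hx0, by omega⟩, p.2 - y0, ⟨hy0, by omega⟩, ?_⟩
    rw [hinner]
    rw [List.all_eq_true]
    intro q hq
    have := (ptsc _).mp (hall q hq)
    have heq : (q.1 + (p.1 - x0), q.2 + (p.2 - y0)) = (q.1 + p.1 - x0, q.2 + p.2 - y0) := by
      ext <;> simp <;> ring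
    rw [heq]
    simpa using this

-- ===== VERDICT (by name: the statement is the Claim_ definition above) =====
theorem isshape_spec : Claim_equal_isshape := by
  intro space points shape _ hpre
  unfold Spec_isshape
  exact isshape_spec' space points shape hpre
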